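-- pv_equiv track=rewrite | github.com/lmcosta98/ia_functional_programing | aula1.py | ex37
-- ===== SOURCE A (Python) =====
-- def ex37(lista):
-- 	if lista == []:
-- 		return [], None, None
--
-- 	if len(lista) == 1:
-- 		return [], lista[0], None
--
-- 	l, m1, m2 = ex37(lista[1:])
--
-- 	if m2 == None:
-- 		return lista[1:], m1, lista[0]
--
-- 	if lista[0] < m1:
-- 		return [m1] + lista[1:], m1, lista[0]
--
-- 	if lista[0] < m2:
-- 		return [m2] + lista[1:], m1, lista[0]
--
-- 	return [lista[0]] + l, m1, m2
-- ===== SOURCE B (Python) =====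
-- def ex37(lista):
--     if lista == []:
--         return [], None, None
--     if len(lista) == 1:
--         return [], lista[0], None
--     m1 = lista[-1]
--     body = lista[:-1]
--     # backward pass: m2s[i] = the m2 value of the suffix lista[i:] (for i <= n-2)
--     m2s_rev = []
--     for x in reversed(body):
--         prev = m2s_rev[-1] if m2s_rev else x
--         m2s_rev.append(x if (x < m1 or x < prev) else prev)
--     m2s = m2s_rev[::-1]
--     # forward pass: the leftmost position whose element triggers a reset decides the list
--     for i in range(len(body) - 1):
--         x = body[i]
--         if x < m1:
--             return lista[:i] + [m1] + lista[i + 1:], m1, m2s[0]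
--         if x < m2s[i + 1]:
--             return lista[:i] + [m2s[i + 1]] + lista[i + 1:], m1, m2s[0]
--     return lista[:-2] + [m1], m1, m2s[0]
-- ===== Notes on version B (the rewrite author's own statement) =====
-- stated objective: faster
-- what changed: Replaces A's O(n^2) recursion (n levels, each slicing and concatenating lists) with two linear passes: a backward fold computing the m2 value of every suffix, then a forward scan that finds the leftmost reset position and builds the output list once.
import Mathlib
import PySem

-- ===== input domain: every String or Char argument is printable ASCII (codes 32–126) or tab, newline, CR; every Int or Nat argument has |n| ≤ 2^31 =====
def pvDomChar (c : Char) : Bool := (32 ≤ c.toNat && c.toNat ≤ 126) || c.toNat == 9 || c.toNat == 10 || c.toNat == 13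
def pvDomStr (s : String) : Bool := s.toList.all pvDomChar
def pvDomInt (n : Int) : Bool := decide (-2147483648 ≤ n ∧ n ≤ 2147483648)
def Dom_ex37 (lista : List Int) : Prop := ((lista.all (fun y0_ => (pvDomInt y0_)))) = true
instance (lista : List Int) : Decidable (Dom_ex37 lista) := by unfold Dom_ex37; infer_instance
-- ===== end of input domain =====

-- B replaces A's quadratic recursion (repeated slicing/concatenation) by two linear passes
-- (a backward fold for the m2 values, a forward scan for the first reset): objective = faster.

-- ===== PORT A =====
-- literal transliteration of A: structural recursion on the list, branches in source order
def ex37 (lista : List Int) : List Int × Option Int × Option Int :=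
  match lista with
  | [] => ([], none, none)                       -- if lista == []
  | [x] => ([], some x, none)                    -- if len(lista) == 1
  | x :: rest =>                                 -- l, m1, m2 = ex37(lista[1:])
    let r := ex37 rest
    let l := r.1
    let m1 := r.2.1
    let m2 := r.2.2
    match m2 with
    | none => (rest, m1, some x)                 -- if m2 == None
    | some m2v =>
      match m1 with
      | some m1v =>
        if x < m1v then (m1v :: rest, m1, some x)        -- if lista[0] < m1
        else if x < m2v then (m2v :: rest, m1, some x)   -- if lista[0] < m2
        else (x :: l, m1, m2)
      | none => (rest, m1, some x)  -- unreachable: m1 is none only together with m2 = none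

-- ===== PORT B =====
-- backward pass of Source B (the m2s_rev loop + reversal), written as right-to-left structural
-- recursion building m2s directly: m2s[i] = m2 value of the suffix starting at i
def pvBuildM2s (m1 : Int) (body : List Int) : List Int :=
  body.foldr (fun x acc =>
    (if x < m1 ∨ x < acc.headD x then x else acc.headD x) :: acc) []
    -- acc.headD x = prev (m2s_rev[-1] if m2s_rev else x); acc = [] only for the last element

-- forward pass of Source B: scan body[:-1] with the parallel m2s list; the first element that
-- triggers a reset decides the output list (prefix kept via the cons in the else branch)
def pvFwd (m1 : Int) (body m2s : List Int) : List Int :=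
  List.rec (motive := fun _ => List Int → List Int)
    (fun _ => [])                                -- unreachable: body is nonempty
    (fun x rest ih m2s =>
      if rest.isEmpty then [m1]                  -- loop ran through: lista[:-2] + [m1]
      else
        let prev := m2s.tail.headD 0             -- m2s[i+1]; in range here, default unused
        if x < m1 then m1 :: (rest ++ [m1])      -- lista[:i] + [m1] + lista[i+1:]
        else if x < prev then prev :: (rest ++ [m1])
        else x :: ih m2s.tail)
    body m2s

def ex37_alt (lista : List Int) : List Int × Option Int × Option Int :=
  if lista.isEmpty then ([], none, none)         -- if lista == []
  else if lista.length == 1 then ([], lista.head?, none)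
  else
    let m1 := lista.getLastD 0                   -- lista[-1] (list nonempty, default unused)
    let body := lista.dropLast                   -- lista[:-1]
    let m2s := pvBuildM2s m1 body
    (pvFwd m1 body m2s, some m1, m2s.head?)

-- ===== PRECONDITION & SPEC =====
def Spec_ex37 (lista : List Int) (out : List Int × Option Int × Option Int) : Prop := out = ex37_alt lista
instance (lista : List Int) (out : List Int × Option Int × Option Int) : Decidable (Spec_ex37 lista out) := by unfold Spec_ex37; infer_instance

-- ===== CLAIM (what is proved, stated in full; the proofs are below) =====
def Claim_equal_ex37 : Prop := ∀ (lista : List Int), Dom_ex37 lista → Spec_ex37 lista (ex37 lista)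

-- ===== LEMMAS AND PROOFS =====

theorem pvSplitLast : ∀ (l : List Int) (x d : Int),
    (x :: l).dropLast ++ [(x :: l).getLastD d] = x :: l := by
  intro l
  induction l with
  | nil => intro x d; rfl
  | cons y l ih =>
    intro x d
    simp only [List.dropLast_cons₂, List.getLastD_cons, List.cons_append]
    have h := ih y x
    simp only [List.getLastD_cons] at h
    rw [h]

theorem pvBuildM2s_cons2 (m1 b : Int) (rest : List Int) :
    pvBuildM2s m1 (b :: rest) =
      (if b < m1 ∨ b < (pvBuildM2s m1 rest).headD b then b
       else (pvBuildM2s m1 rest).headD b) :: pvBuildM2s m1 rest := rfl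

theorem pvFwd_cons (m1 x : Int) (rest m2s : List Int) :
    pvFwd m1 (x :: rest) m2s =
      if rest.isEmpty then [m1]
      else if x < m1 then m1 :: (rest ++ [m1])
      else if x < m2s.tail.headD 0 then m2s.tail.headD 0 :: (rest ++ [m1])
      else x :: pvFwd m1 rest m2s.tail := rfl

theorem pvBuildM2s_cons (m1 : Int) (bs : List Int) (c : Int) :
    ∃ p tl, pvBuildM2s m1 (c :: bs) = p :: tl :=
  ⟨_, _, pvBuildM2s_cons2 m1 c bs⟩

theorem ex37_key (m1 : Int) (body : List Int) (hb : body ≠ []) :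
    ex37 (body ++ [m1]) =
      (pvFwd m1 body (pvBuildM2s m1 body), some m1, (pvBuildM2s m1 body).head?) := by
  induction body with
  | nil => exact absurd rfl hb
  | cons b rest ih =>
    cases rest with
    | nil => simp [ex37, pvFwd_cons, pvBuildM2s]
    | cons c bs =>
      obtain ⟨p, tl, hp⟩ := pvBuildM2s_cons m1 bs c
      have ih' := ih (by simp)
      have hB : pvBuildM2s m1 (b :: c :: bs) = (if b < m1 ∨ b < p then b else p) :: p :: tl := by
        rw [pvBuildM2s_cons2, hp]; rfl
      rw [hp] at ih'
      simp only [List.cons_append] at ih' ⊢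
      simp only [ex37, ih', hB]
      by_cases h1 : b < m1
      · simp [pvFwd_cons, h1]
      · by_cases h2 : b < p
        · simp [pvFwd_cons, h1, h2]
        · simp [pvFwd_cons, h1, h2]

-- ===== VERDICT (by name: the statement is the Claim_ definition above) =====
theorem ex37_spec : Claim_equal_ex37 := by
  intro lista _
  unfold Spec_ex37
  match lista with
  | [] => rfl
  | [x] => rfl
  | x :: y :: rest =>
    have hb : (x :: y :: rest).dropLast ≠ [] := by simp
    have hsplit : (x :: y :: rest).dropLast ++ [(x :: y :: rest).getLastD 0] = x :: y :: rest :=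
      pvSplitLast (y :: rest) x 0
    have key := ex37_key ((x :: y :: rest).getLastD 0) ((x :: y :: rest).dropLast) hb
    rw [hsplit] at key
    simpa only [ex37_alt] using key
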